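-- pv_equiv track=rewrite | github.com/Emasoft/dht | src/DHT/modules/dockerfile_generator.py | validate_dockerfile
-- ===== SOURCE A (Python) =====
-- def validate_dockerfile(dockerfile_content: str) -> list[str]:
--     """
--     Validate Dockerfile content.
--
--     Args:
--         dockerfile_content: Dockerfile content
--
--     Returns:
--         List of validation issues
--     """
--     issues = []
--
--     lines = dockerfile_content.split("\n")
--
--     # Check for FROM instruction
--     if not any(line.strip().startswith("FROM") for line in lines):
--         issues.append("Missing FROM instruction")
--
--     # Check for WORKDIR
--     if not any(line.strip().startswith("WORKDIR") for line in lines):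
--         issues.append("Missing WORKDIR instruction")
--
--     # Check for security issues
--     if any("--no-cache-dir" not in line and "pip install" in line for line in lines):
--         issues.append("pip install should use --no-cache-dir")
--
--     if any("apt-get install" in line and "rm -rf /var/lib/apt/lists/*" not in line for line in lines):
--         issues.append("apt-get install should clean up package lists")
--
--     # Check for running as root in production
--     if "USER" not in dockerfile_content and "production" in dockerfile_content.lower():
--         issues.append("Production container should not run as root")
--
--     return issues
-- ===== SOURCE B (Python) =====
-- def validate_dockerfile(dockerfile_content: str) -> list[str]:
--     """Single pass over the lines maintaining four flags, then assemble issues."""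
--     has_from = has_workdir = pip_issue = apt_issue = False
--     for line in dockerfile_content.split("\n"):
--         stripped = line.strip()
--         if stripped.startswith("FROM"):
--             has_from = True
--         if stripped.startswith("WORKDIR"):
--             has_workdir = True
--         if "pip install" in line and "--no-cache-dir" not in line:
--             pip_issue = True
--         if "apt-get install" in line and "rm -rf /var/lib/apt/lists/*" not in line:
--             apt_issue = True
--     issues = []
--     if not has_from:
--         issues.append("Missing FROM instruction")
--     if not has_workdir:
--         issues.append("Missing WORKDIR instruction")
--     if pip_issue:
--         issues.append("pip install should use --no-cache-dir")
--     if apt_issue: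
--         issues.append("apt-get install should clean up package lists")
--     if "USER" not in dockerfile_content and "production" in dockerfile_content.lower():
--         issues.append("Production container should not run as root")
--     return issues
-- ===== Notes on version B (the rewrite author's own statement) =====
-- stated objective: simpler
-- what changed: Replaces the four separate any(...) scans over the split lines with one for-loop that sets four boolean flags in a single pass, then appends the issues in the original order.
import Mathlib
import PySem

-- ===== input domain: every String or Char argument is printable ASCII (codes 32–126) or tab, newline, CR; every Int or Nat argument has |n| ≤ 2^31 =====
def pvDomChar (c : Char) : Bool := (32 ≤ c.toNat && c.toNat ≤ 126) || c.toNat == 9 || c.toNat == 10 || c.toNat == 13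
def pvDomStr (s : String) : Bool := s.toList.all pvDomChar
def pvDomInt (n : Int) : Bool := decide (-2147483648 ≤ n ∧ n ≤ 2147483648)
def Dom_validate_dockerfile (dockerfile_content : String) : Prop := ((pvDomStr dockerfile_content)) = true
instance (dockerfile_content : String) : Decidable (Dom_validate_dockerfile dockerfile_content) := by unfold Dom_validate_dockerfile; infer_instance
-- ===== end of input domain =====

-- B replaces A's four separate any(...) scans over the lines by one single-pass loop
-- maintaining four boolean flags (objective: simpler, one pass instead of four).


-- ===== PORT A =====
def validate_dockerfile (dockerfile_content : String) : List String :=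
  let issues : List String := []
  let lines := (PySem.Str.split? dockerfile_content "\n").getD []
  let issues := if !(lines.any (fun line => PySem.Str.startswith (PySem.Str.strip line) "FROM"))
    then issues ++ ["Missing FROM instruction"] else issues
  let issues := if !(lines.any (fun line => PySem.Str.startswith (PySem.Str.strip line) "WORKDIR"))
    then issues ++ ["Missing WORKDIR instruction"] else issues
  let issues := if lines.any (fun line => !PySem.Str.isIn "--no-cache-dir" line && PySem.Str.isIn "pip install" line)
    then issues ++ ["pip install should use --no-cache-dir"] else issues
  let issues := if lines.any (fun line => PySem.Str.isIn "apt-get install" line && !PySem.Str.isIn "rm -rf /var/lib/apt/lists/*" line)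
    then issues ++ ["apt-get install should clean up package lists"] else issues
  let issues := if !PySem.Str.isIn "USER" dockerfile_content && PySem.Str.isIn "production" (PySem.Str.lower dockerfile_content)
    then issues ++ ["Production container should not run as root"] else issues
  issues

-- ===== PORT B =====
-- one loop step: updates the four flags (has_from, has_workdir, pip_issue, apt_issue)
def vdStep (st : Bool × Bool × Bool × Bool) (line : String) : Bool × Bool × Bool × Bool :=
  let stripped := PySem.Str.strip line
  ((st.1 || PySem.Str.startswith stripped "FROM"),
   (st.2.1 || PySem.Str.startswith stripped "WORKDIR"),
   (st.2.2.1 || (PySem.Str.isIn "pip install" line && !PySem.Str.isIn "--no-cache-dir" line)),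
   (st.2.2.2 || (PySem.Str.isIn "apt-get install" line && !PySem.Str.isIn "rm -rf /var/lib/apt/lists/*" line)))

def validate_dockerfile_alt (dockerfile_content : String) : List String :=
  let st := ((PySem.Str.split? dockerfile_content "\n").getD []).foldl vdStep (false, false, false, false)
  (if !st.1 then ["Missing FROM instruction"] else []) ++
  (if !st.2.1 then ["Missing WORKDIR instruction"] else []) ++
  (if st.2.2.1 then ["pip install should use --no-cache-dir"] else []) ++
  (if st.2.2.2 then ["apt-get install should clean up package lists"] else []) ++
  (if !PySem.Str.isIn "USER" dockerfile_content && PySem.Str.isIn "production" (PySem.Str.lower dockerfile_content)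
    then ["Production container should not run as root"] else [])

-- ===== PRECONDITION & SPEC =====
def Spec_validate_dockerfile (dockerfile_content : String) (out : List String) : Prop := out = validate_dockerfile_alt dockerfile_content
instance (dockerfile_content : String) (out : List String) : Decidable (Spec_validate_dockerfile dockerfile_content out) := by unfold Spec_validate_dockerfile; infer_instance

-- ===== CLAIM (what is proved, stated in full; the proofs are below) =====
def Claim_equal_validate_dockerfile : Prop := ∀ (dockerfile_content : String), Dom_validate_dockerfile dockerfile_content → Spec_validate_dockerfile dockerfile_content (validate_dockerfile dockerfile_content)

-- ===== LEMMAS AND PROOFS =====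
-- the flag fold computes the disjunction of the per-line predicates
lemma foldl_vdStep (lines : List String) (a b c d : Bool) :
    lines.foldl vdStep (a, b, c, d) =
      ((a || lines.any (fun line => PySem.Str.startswith (PySem.Str.strip line) "FROM")),
       (b || lines.any (fun line => PySem.Str.startswith (PySem.Str.strip line) "WORKDIR")),
       (c || lines.any (fun line => PySem.Str.isIn "pip install" line && !PySem.Str.isIn "--no-cache-dir" line)),
       (d || lines.any (fun line => PySem.Str.isIn "apt-get install" line && !PySem.Str.isIn "rm -rf /var/lib/apt/lists/*" line))) := by
  induction lines generalizing a b c d with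
  | nil => simp
  | cons l ls ih => simp [vdStep, ih, Bool.or_assoc]

-- ===== VERDICT (by name: the statement is the Claim_ definition above) =====
theorem validate_dockerfile_spec : Claim_equal_validate_dockerfile := by
  intro s _
  unfold Spec_validate_dockerfile validate_dockerfile validate_dockerfile_alt
  simp only [foldl_vdStep, Bool.false_or]
  have hcomm : ((PySem.Str.split? s "\n").getD []).any
      (fun line => !PySem.Str.isIn "--no-cache-dir" line && PySem.Str.isIn "pip install" line)
    = ((PySem.Str.split? s "\n").getD []).any
      (fun line => PySem.Str.isIn "pip install" line && !PySem.Str.isIn "--no-cache-dir" line) := by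
    exact congrArg _ (funext fun x => Bool.and_comm _ _)
  rw [hcomm]
  split_ifs <;> simp_all
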